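-- pv_equiv track=rewrite | github.com/ShreyanshZ/Zappos-Internship-2017 | Reverse.py | reverseButPreserveWhitespace
-- ===== SOURCE A (Python) =====
-- def  reverseButPreserveWhitespace(reverseMe):
--     s = ""
--     flag = 0
--     word = ""
--     for i in range(len(reverseMe)):
--         if(reverseMe[i] == " " and flag == 0):
--             s += " "
--         elif (reverseMe[i] == " " and flag == 1):
--             flag = 0
--             s += word[: : -1] + " "
--             word = ""
--         else:
--             flag = 1
--             word += reverseMe[i]
--     s += word[: : -1]
--     return s
-- ===== SOURCE B (Python) =====
-- def reverseButPreserveWhitespace(reverseMe):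
--     return " ".join(w[::-1] for w in reverseMe.split(" "))
-- ===== Notes on version B (the rewrite author's own statement) =====
-- stated objective: simpler
-- what changed: Replaces A's character-by-character state machine (flag + pending-word accumulator with repeated string +=) by a one-line split on the single space character, per-token reversal and rejoin, which preserves empty tokens and hence the exact whitespace layout.
import Mathlib
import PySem

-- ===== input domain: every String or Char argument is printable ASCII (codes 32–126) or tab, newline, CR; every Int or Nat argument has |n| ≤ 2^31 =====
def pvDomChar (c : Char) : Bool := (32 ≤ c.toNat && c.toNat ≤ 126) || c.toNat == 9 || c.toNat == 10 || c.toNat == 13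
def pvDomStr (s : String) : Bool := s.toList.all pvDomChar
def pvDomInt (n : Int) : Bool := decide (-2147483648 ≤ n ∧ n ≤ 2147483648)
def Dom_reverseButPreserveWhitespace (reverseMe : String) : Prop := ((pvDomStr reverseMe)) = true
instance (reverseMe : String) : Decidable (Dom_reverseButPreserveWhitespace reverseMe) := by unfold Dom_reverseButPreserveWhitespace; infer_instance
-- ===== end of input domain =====

-- B replaces A's char-by-char flag/word state machine by split-on-space, reverse each token, rejoin (simpler decomposition; same O(n) cost).


-- ===== PORT A =====
-- loop body of A: state (s, flag, word); `word[::-1]` is List.reverse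
def revStep (st : List Char × Nat × List Char) (c : Char) : List Char × Nat × List Char :=
  if c = ' ' ∧ st.2.1 = 0 then (st.1 ++ [' '], st.2.1, st.2.2)
  else if c = ' ' ∧ st.2.1 = 1 then (st.1 ++ st.2.2.reverse ++ [' '], 0, [])
  else (st.1, 1, st.2.2 ++ [c])

def reverseButPreserveWhitespace (reverseMe : String) : String :=
  -- `for i in range(len(reverseMe)): … reverseMe[i] …` reads the characters in order
  let st := reverseMe.toList.foldl revStep ([], 0, [])
  String.ofList (st.1 ++ st.2.2.reverse)

-- ===== PORT B =====
-- `" ".join(w[::-1] for w in reverseMe.split(" "))`; split(" ") is List.splitOn ' ' (single-char sep, keeps empty tokens)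
def reverseButPreserveWhitespace_alt (reverseMe : String) : String :=
  String.ofList (PySem.Chars.join [' '] ((List.splitOn ' ' reverseMe.toList).map List.reverse))

-- ===== PRECONDITION & SPEC =====
def Spec_reverseButPreserveWhitespace (reverseMe : String) (out : String) : Prop := out = reverseButPreserveWhitespace_alt reverseMe
instance (reverseMe : String) (out : String) : Decidable (Spec_reverseButPreserveWhitespace reverseMe out) := by unfold Spec_reverseButPreserveWhitespace; infer_instance

-- ===== CLAIM (what is proved, stated in full; the proofs are below) =====
def Claim_equal_reverseButPreserveWhitespace : Prop := ∀ (reverseMe : String), Dom_reverseButPreserveWhitespace reverseMe → Spec_reverseButPreserveWhitespace reverseMe (reverseButPreserveWhitespace reverseMe)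

-- ===== LEMMAS AND PROOFS =====

-- splitOnP over a space-free prefix just extends the first token
lemma splitOnP_append_of_not_mem (p : Char → Bool) (w l : List Char)
    (hw : ∀ c ∈ w, p c = false) :
    List.splitOnP p (w ++ l) = (List.splitOnP p l).modifyHead (w ++ ·) := by
  induction w with
  | nil => cases h : List.splitOnP p l <;> simp [h]
  | cons c w ih =>
    have hc : p c = false := hw c (by simp)
    have hrest : ∀ c' ∈ w, p c' = false := fun c' h => hw c' (by simp [h])
    obtain ⟨t, ts, ht⟩ := List.exists_cons_of_ne_nil (List.splitOnP_ne_nil p l)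
    simp [List.splitOnP_cons, hc, ih hrest, ht]

lemma splitOn_space_free (w : List Char) (hw : ' ' ∉ w) :
    List.splitOn ' ' w = [w] := by
  have := splitOnP_append_of_not_mem (· == ' ') w []
    (fun c hc => by simp; rintro rfl; exact hw hc)
  simpa [List.splitOn, List.splitOnP_nil] using this

lemma splitOn_word_space (w rest : List Char) (hw : ' ' ∉ w) :
    List.splitOn ' ' (w ++ ' ' :: rest) = w :: List.splitOn ' ' rest := by
  have := splitOnP_append_of_not_mem (· == ' ') w (' ' :: rest)
    (fun c hc => by simp; rintro rfl; exact hw hc)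
  simp [List.splitOn, List.splitOnP_cons] at this ⊢
  simpa using this

-- the tail of A's fold, with the final append of the pending word
def revFin (st : List Char × Nat × List Char) (cs : List Char) : List Char :=
  let st' := cs.foldl revStep st
  st'.1 ++ st'.2.2.reverse

-- loop invariant of A: from state (s, flag word, word) the rest of the run produces s ++ the split-reverse-join of word ++ cs
lemma revFin_eq (cs : List Char) : ∀ (s word : List Char), ' ' ∉ word →
    revFin (s, (if word = [] then 0 else 1), word) cs
      = s ++ PySem.Chars.join [' '] ((List.splitOn ' ' (word ++ cs)).map List.reverse) := by
  induction cs with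
  | nil =>
    intro s word hw
    simp [revFin, splitOn_space_free word hw, PySem.Chars.join, List.intercalate]
  | cons c rest ih =>
    intro s word hw
    obtain ⟨t, ts, ht⟩ := List.exists_cons_of_ne_nil (List.splitOnP_ne_nil (· == ' ') rest)
    have htt : List.splitOn ' ' rest = t :: ts := ht
    by_cases hc : c = ' '
    · subst hc
      by_cases hwnil : word = []
      · subst hwnil
        have hstep : revStep (s, (if ([] : List Char) = [] then 0 else 1), []) ' '
            = (s ++ [' '], (if ([] : List Char) = [] then 0 else 1), []) := by
          simp [revStep]
        have h1 := ih (s ++ [' ']) [] (by simp)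
        have hsplit : List.splitOn ' ' (' ' :: rest) = [] :: List.splitOn ' ' rest :=
          splitOn_word_space [] rest (by simp)
        show revFin (revStep (s, (if ([] : List Char) = [] then 0 else 1), []) ' ') rest = _
        rw [hstep, h1]
        simp only [List.nil_append, hsplit, htt, List.map_cons, PySem.Chars.join_cons_cons]
        simp
      · have hstep : revStep (s, (if word = [] then 0 else 1), word) ' '
            = (s ++ word.reverse ++ [' '], (if ([] : List Char) = [] then 0 else 1), []) := by
          simp [revStep, hwnil]
        have h1 := ih (s ++ word.reverse ++ [' ']) [] (by simp)
        have hsplit := splitOn_word_space word rest hw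
        show revFin (revStep (s, (if word = [] then 0 else 1), word) ' ') rest = _
        rw [hstep, h1]
        simp only [List.nil_append, hsplit, htt, List.map_cons, PySem.Chars.join_cons_cons]
        simp
    · have hw' : ' ' ∉ word ++ [c] := by
        simp [hw]; exact fun h => hc h.symm
      have hstep : revStep (s, (if word = [] then 0 else 1), word) c
          = (s, (if word ++ [c] = [] then 0 else 1), word ++ [c]) := by
        simp [revStep, hc]
      have h1 := ih s (word ++ [c]) hw'
      show revFin (revStep (s, (if word = [] then 0 else 1), word) c) rest = _
      rw [hstep, h1]
      simp

-- ===== VERDICT (by name: the statement is the Claim_ definition above) =====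
theorem reverseButPreserveWhitespace_spec : Claim_equal_reverseButPreserveWhitespace := by
  intro reverseMe _
  show _ = _
  have h := revFin_eq reverseMe.toList [] [] (by simp)
  have h2 : revFin ([], 0, []) reverseMe.toList
      = revFin ([], (if ([] : List Char) = [] then 0 else 1), []) reverseMe.toList := by
    norm_num
  have hA : reverseButPreserveWhitespace reverseMe
      = String.ofList (revFin ([], 0, []) reverseMe.toList) := rfl
  rw [hA, h2, h]
  simp [reverseButPreserveWhitespace_alt]
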